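-- pv_equiv track=rewrite | github.com/CharlesZZY/OpenManus | benchmarks/serving_benchmark/datasets/quality/truthfulqa.py | _best_text_match
-- ===== SOURCE A (Python) =====
-- from typing import Any, Dict, List
--
-- def _best_text_match(text: str, options: List[str]) -> int:
--     """Return index of the option that best matches the model output."""
--     text_lower = text.lower().strip()
--     best_idx, best_score = 0, -1
--     for i, opt in enumerate(options):
--         opt_lower = opt.lower().strip()
--         if opt_lower in text_lower:
--             score = len(opt_lower)
--             if score > best_score:
--                 best_score = score
--                 best_idx = i
--     return best_idx if best_score > 0 else -1
-- ===== SOURCE B (Python) =====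
-- from typing import List
--
-- def _best_text_match(text: str, options: List[str]) -> int:
--     """Return index of the option that best matches the model output."""
--     text_lower = text.lower().strip()
--     keyed = sorted(((opt.lower().strip(), i) for i, opt in enumerate(options)),
--                    key=lambda p: -len(p[0]))
--     for key, i in keyed:
--         if key and key in text_lower:
--             return i
--     return -1
-- ===== Notes on version B (the rewrite author's own statement) =====
-- stated objective: alternative
-- what changed: A does a single running-max scan tracking best index/score over all options; B first builds (stripped-lowercased option, index) pairs, stably sorts them by descending key length, then returns the index of the first non-empty key that is a substring of the text, stopping at the first hit instead of substring-testing every option.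
import Mathlib
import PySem

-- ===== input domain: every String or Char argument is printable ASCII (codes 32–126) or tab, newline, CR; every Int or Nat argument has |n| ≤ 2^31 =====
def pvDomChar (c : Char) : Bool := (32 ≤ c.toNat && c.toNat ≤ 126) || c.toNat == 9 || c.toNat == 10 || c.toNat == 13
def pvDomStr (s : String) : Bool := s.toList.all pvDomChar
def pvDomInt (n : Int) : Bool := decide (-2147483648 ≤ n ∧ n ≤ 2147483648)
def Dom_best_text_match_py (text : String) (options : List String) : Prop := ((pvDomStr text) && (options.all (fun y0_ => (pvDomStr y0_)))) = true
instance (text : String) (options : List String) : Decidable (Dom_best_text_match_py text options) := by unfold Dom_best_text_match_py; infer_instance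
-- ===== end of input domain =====

-- B replaces A's running best-index/best-score scan by a stable sort of (key, index)
-- pairs by descending key length followed by a find-first pass; same result, different
-- decomposition (sort-then-scan instead of running max).

-- ===== PORT A =====
def best_text_match_py (text : String) (options : List String) : Int :=
  let text_lower := PySem.Str.strip (PySem.Str.lower text)
  let r := (PySem.List.enumerate options).foldl
    (fun (st : Int × Int) p =>
      let opt_lower := PySem.Str.strip (PySem.Str.lower p.2)
      if PySem.Str.isIn opt_lower text_lower then
        let score := PySem.Str.len opt_lower
        if score > st.2 then (p.1, score) else st
      else st) (0, -1)
  if r.2 > 0 then r.1 else -1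

-- ===== PORT B =====
-- Source B's 'for key, i in keyed: if key and key in text_lower: return i / return -1' loop
def pvFindB (t : String) : List (String × Int) → Int
  | [] => -1
  | p :: rest =>
    if (p.1 != "") && PySem.Str.isIn p.1 t then p.2 else pvFindB t rest

def best_text_match_py_alt (text : String) (options : List String) : Int :=
  let text_lower := PySem.Str.strip (PySem.Str.lower text)
  let keyed := PySem.List.sorted
    ((PySem.List.enumerate options).map
      (fun p => (PySem.Str.strip (PySem.Str.lower p.2), p.1)))
    (fun p => -(PySem.Str.len p.1))
  pvFindB text_lower keyed

-- ===== PRECONDITION & SPEC =====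
def Spec_best_text_match_py (text : String) (options : List String) (out : Int) : Prop := out = best_text_match_py_alt text options
instance (text : String) (options : List String) (out : Int) : Decidable (Spec_best_text_match_py text options out) := by unfold Spec_best_text_match_py; infer_instance

-- ===== CLAIM (what is proved, stated in full; the proofs are below) =====
def Claim_equal_best_text_match_py : Prop := ∀ (text : String) (options : List String), Dom_best_text_match_py text options → Spec_best_text_match_py text options (best_text_match_py text options)

-- ===== LEMMAS AND PROOFS =====

-- proof-only helpers
def pvKeyOf (o : String) : String := PySem.Str.strip (PySem.Str.lower o)

def pvKlen (p : String × Int) : Int := PySem.Str.len p.1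

-- A's loop step over enumerate options
def pvStepA (t : String) (st : Int × Int) (p : Int × String) : Int × Int :=
  if PySem.Str.isIn (pvKeyOf p.2) t then
    if PySem.Str.len (pvKeyOf p.2) > st.2 then (p.1, PySem.Str.len (pvKeyOf p.2)) else st
  else st

-- B's match predicate on a (key, index) pair
def pvPb (t : String) (p : String × Int) : Bool := (p.1 != "") && PySem.Str.isIn p.1 t

-- first match of a (key, index) list, as an Option
def pvFm (t : String) : List (String × Int) → Option (String × Int)
  | [] => none
  | p :: rest => if pvPb t p then some p else pvFm t rest

-- running "first strict max-length match" combinator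
def pvComb (t : String) (acc : Option (String × Int)) (p : String × Int) : Option (String × Int) :=
  if pvPb t p then
    match acc with
    | none => some p
    | some m => if pvKlen m < pvKlen p then some p else some m
  else acc

def pvSwap (q : Int × String) : String × Int := (pvKeyOf q.2, q.1)

def pvToRes : Option (String × Int) → Int
  | none => -1
  | some m => m.2

def pvBef (a b : String × Int) : Bool := decide ((-(PySem.Str.len a.1) : Int) < -(PySem.Str.len b.1))

theorem pvA_eq (text : String) (options : List String) :
    best_text_match_py text options =
      (if ((PySem.List.enumerate options).foldl
            (pvStepA (PySem.Str.strip (PySem.Str.lower text))) (0, -1)).2 > 0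
       then ((PySem.List.enumerate options).foldl
            (pvStepA (PySem.Str.strip (PySem.Str.lower text))) (0, -1)).1 else -1) := rfl

theorem pv_len_pos (s : String) (h : s ≠ "") : 0 < PySem.Str.len s := by
  rw [PySem.Str.len_eq]
  have hne : s.toList ≠ [] := fun hn => h (String.toList_inj.mp (by simp [hn]))
  have : 0 < s.toList.length := List.length_pos_iff.mpr hne
  exact_mod_cast this

theorem pv_len_empty : PySem.Str.len "" = 0 := rfl

theorem pv_stepA_noin {t : String} {p : Int × String} (bi bs : Int)
    (hin : ¬ PySem.Str.isIn (pvKeyOf p.2) t = true) : pvStepA t (bi, bs) p = (bi, bs) := by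
  simp only [pvStepA]; rw [if_neg hin]

theorem pv_stepA_keep {t : String} {p : Int × String} (bi bs : Int)
    (hin : PySem.Str.isIn (pvKeyOf p.2) t = true)
    (hle : PySem.Str.len (pvKeyOf p.2) ≤ bs) : pvStepA t (bi, bs) p = (bi, bs) := by
  simp only [pvStepA]; rw [if_pos hin, if_neg (by omega)]

theorem pv_stepA_up {t : String} {p : Int × String} (bi bs : Int)
    (hin : PySem.Str.isIn (pvKeyOf p.2) t = true)
    (hgt : bs < PySem.Str.len (pvKeyOf p.2)) :
    pvStepA t (bi, bs) p = (p.1, PySem.Str.len (pvKeyOf p.2)) := by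
  simp only [pvStepA]; rw [if_pos hin, if_pos (by omega)]

theorem pvPb_swap_true {t : String} {q : Int × String} (hk : pvKeyOf q.2 ≠ "")
    (hin : PySem.Str.isIn (pvKeyOf q.2) t = true) : pvPb t (pvSwap q) = true := by
  have h1 : (pvKeyOf q.2 != "") = true := bne_iff_ne.mpr hk
  simp only [pvPb, pvSwap, h1, hin, Bool.and_self]

theorem pvPb_swap_empty {t : String} {q : Int × String} (hk : pvKeyOf q.2 = "") :
    pvPb t (pvSwap q) = false := by
  simp only [pvPb, pvSwap, hk, bne_self_eq_false, Bool.false_and]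

theorem pvPb_swap_noin {t : String} {q : Int × String}
    (hin : ¬ PySem.Str.isIn (pvKeyOf q.2) t = true) : pvPb t (pvSwap q) = false := by
  have h1 : PySem.Str.isIn (pvKeyOf q.2) t = false := by
    revert hin; cases PySem.Str.isIn (pvKeyOf q.2) t <;> simp
  simp only [pvPb, pvSwap, h1, Bool.and_false]

theorem pvComb_false {t : String} {p : String × Int} (acc : Option (String × Int))
    (h : pvPb t p = false) : pvComb t acc p = acc := by
  simp only [pvComb, h, Bool.false_eq_true, if_false]

theorem pvComb_none {t : String} {p : String × Int} (h : pvPb t p = true) :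
    pvComb t none p = some p := by
  simp only [pvComb, h, if_true]

theorem pvComb_keep {t : String} {p m : String × Int} (h : pvPb t p = true)
    (hle : pvKlen p ≤ pvKlen m) : pvComb t (some m) p = some m := by
  simp only [pvComb, h, if_true]
  rw [if_neg (by omega)]

theorem pvComb_up {t : String} {p m : String × Int} (h : pvPb t p = true)
    (hlt : pvKlen m < pvKlen p) : pvComb t (some m) p = some p := by
  simp only [pvComb, h, if_true]
  rw [if_pos (by omega)]

theorem pvKlen_swap (q : Int × String) : pvKlen (pvSwap q) = PySem.Str.len (pvKeyOf q.2) := rfl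

-- A's loop once a strictly positive best is held agrees with the pvComb fold
theorem pvA2 (t : String) (l : List (Int × String)) :
    ∀ p : String × Int, 0 < pvKlen p →
      ∃ m : String × Int,
        l.foldl (fun acc q => pvComb t acc (pvSwap q)) (some p) = some m ∧
        l.foldl (pvStepA t) (p.2, pvKlen p) = (m.2, pvKlen m) ∧ 0 < pvKlen m := by
  induction l with
  | nil => intro p hp; exact ⟨p, rfl, rfl, hp⟩
  | cons q l ih =>
    intro p hp
    simp only [List.foldl_cons]
    by_cases hin : PySem.Str.isIn (pvKeyOf q.2) t = true
    · by_cases hk : pvKeyOf q.2 = ""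
      · have hlen : PySem.Str.len (pvKeyOf q.2) = 0 := by rw [hk]; exact pv_len_empty
        rw [pvComb_false _ (pvPb_swap_empty hk), pv_stepA_keep _ _ hin (by omega)]
        exact ih p hp
      · have hq : 0 < pvKlen (pvSwap q) := by
          rw [pvKlen_swap]; exact pv_len_pos _ hk
        by_cases hgt : pvKlen p < PySem.Str.len (pvKeyOf q.2)
        · rw [pvComb_up (pvPb_swap_true hk hin) (by rw [pvKlen_swap]; omega),
            pv_stepA_up _ _ hin hgt]
          obtain ⟨m, h1, h2, h3⟩ := ih (pvSwap q) hq
          exact ⟨m, h1, by rw [← pvKlen_swap]; exact h2, h3⟩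
        · rw [pvComb_keep (pvPb_swap_true hk hin) (by rw [pvKlen_swap]; omega),
            pv_stepA_keep _ _ hin (by omega)]
          exact ih p hp
    · rw [pvComb_false _ (pvPb_swap_noin hin), pv_stepA_noin _ _ hin]
      exact ih p hp

-- before any positive match, A's final gate agrees with the pvComb fold result
theorem pvA1 (t : String) (l : List (Int × String)) :
    ∀ bi bs : Int, bs ≤ 0 →
      (if (l.foldl (pvStepA t) (bi, bs)).2 > 0 then (l.foldl (pvStepA t) (bi, bs)).1 else -1)
        = pvToRes (l.foldl (fun acc q => pvComb t acc (pvSwap q)) none) := by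
  induction l with
  | nil =>
    intro bi bs hbs
    simp only [List.foldl_nil]
    rw [if_neg (by omega)]; rfl
  | cons q l ih =>
    intro bi bs hbs
    simp only [List.foldl_cons]
    by_cases hin : PySem.Str.isIn (pvKeyOf q.2) t = true
    · by_cases hk : pvKeyOf q.2 = ""
      · have hlen : PySem.Str.len (pvKeyOf q.2) = 0 := by rw [hk]; exact pv_len_empty
        rw [pvComb_false _ (pvPb_swap_empty hk)]
        by_cases hup : bs < 0
        · rw [pv_stepA_up _ _ hin (by omega), hlen]
          exact ih q.1 0 (by omega)
        · rw [pv_stepA_keep _ _ hin (by omega)]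
          exact ih bi bs hbs
      · have hq : 0 < pvKlen (pvSwap q) := by
          rw [pvKlen_swap]; exact pv_len_pos _ hk
        rw [pvComb_none (pvPb_swap_true hk hin), pv_stepA_up _ _ hin (by
          have := pv_len_pos (pvKeyOf q.2) hk; omega)]
        obtain ⟨m, hfold, hA, hmpos⟩ := pvA2 t l (pvSwap q) hq
        have hsw : ((pvSwap q).2, pvKlen (pvSwap q)) = (q.1, PySem.Str.len (pvKeyOf q.2)) := rfl
        rw [← hsw, hA, hfold, if_pos (by exact hmpos)]
        rfl
    · rw [pvComb_false _ (pvPb_swap_noin hin), pv_stepA_noin _ _ hin]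
      exact ih bi bs hbs

theorem pv_bef_iff (a b : String × Int) : pvBef a b = true ↔ pvKlen b < pvKlen a := by
  simp [pvBef, pvKlen]

theorem pv_bef_false_iff (a b : String × Int) : pvBef a b = false ↔ pvKlen a ≤ pvKlen b := by
  rw [← Bool.not_eq_true, pv_bef_iff]; omega

theorem pv_insertBy_nil (p : String × Int) : PySem.List.insertBy pvBef p [] = [p] := rfl

theorem pv_insertBy_pos {p y : String × Int} (ys : List (String × Int))
    (hb : pvBef p y = true) : PySem.List.insertBy pvBef p (y :: ys) = p :: y :: ys := by
  simp only [PySem.List.insertBy, hb, if_true]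

theorem pv_insertBy_neg {p y : String × Int} (ys : List (String × Int))
    (hb : pvBef p y = false) :
    PySem.List.insertBy pvBef p (y :: ys) = y :: PySem.List.insertBy pvBef p ys := by
  simp only [PySem.List.insertBy, hb, Bool.false_eq_true, if_false]

theorem pv_fm_pos {t : String} {y : String × Int} (ys : List (String × Int))
    (h : pvPb t y = true) : pvFm t (y :: ys) = some y := by
  simp only [pvFm, h, if_true]

theorem pv_fm_neg {t : String} {y : String × Int} (ys : List (String × Int))
    (h : pvPb t y = false) : pvFm t (y :: ys) = pvFm t ys := by
  simp only [pvFm, h, Bool.false_eq_true, if_false]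

theorem pv_fm_mem {t : String} {m : String × Int} (l : List (String × Int))
    (h : pvFm t l = some m) : m ∈ l := by
  induction l with
  | nil => simp [pvFm] at h
  | cons y ys ih =>
    by_cases hy : pvPb t y = true
    · rw [pv_fm_pos ys hy] at h
      injection h with h1; simp [h1]
    · have hy' : pvPb t y = false := by revert hy; cases pvPb t y <;> simp
      rw [pv_fm_neg ys hy'] at h
      exact List.mem_cons_of_mem _ (ih h)

-- insertion keeps the list sorted by non-increasing key length
theorem pv_ins_pairwise (p : String × Int) (acc : List (String × Int))
    (h : acc.Pairwise (fun a b => pvKlen b ≤ pvKlen a)) :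
    (PySem.List.insertBy pvBef p acc).Pairwise (fun a b => pvKlen b ≤ pvKlen a) := by
  induction acc with
  | nil => simp [pv_insertBy_nil]
  | cons y ys ih =>
    rw [List.pairwise_cons] at h
    obtain ⟨hy, hys⟩ := h
    by_cases hb : pvBef p y = true
    · have hlt : pvKlen y < pvKlen p := (pv_bef_iff p y).mp hb
      rw [pv_insertBy_pos ys hb, List.pairwise_cons]
      constructor
      · intro a ha
        rcases List.mem_cons.mp ha with h1 | h1
        · rw [h1]; omega
        · have := hy a h1; omega
      · rw [List.pairwise_cons]; exact ⟨hy, hys⟩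
    · have hb' : pvBef p y = false := by revert hb; cases pvBef p y <;> simp
      have hge : pvKlen p ≤ pvKlen y := (pv_bef_false_iff p y).mp hb'
      rw [pv_insertBy_neg ys hb', List.pairwise_cons]
      constructor
      · intro a ha
        rcases (PySem.List.mem_insertBy (before := pvBef) (x := p) (ys := ys) (y := a)).mp ha with h1 | h1
        · rw [h1]; exact hge
        · exact hy a h1
      · exact ih hys

-- inserting p into a sorted accumulator updates the first match like pvComb
theorem pv_ins_fm (t : String) (p : String × Int) (acc : List (String × Int))
    (h : acc.Pairwise (fun a b => pvKlen b ≤ pvKlen a)) :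
    pvFm t (PySem.List.insertBy pvBef p acc) = pvComb t (pvFm t acc) p := by
  induction acc with
  | nil =>
    rw [pv_insertBy_nil]
    by_cases hp : pvPb t p = true
    · rw [pv_fm_pos [] hp]
      exact (pvComb_none hp).symm
    · have hp' : pvPb t p = false := by revert hp; cases pvPb t p <;> simp
      rw [pv_fm_neg [] hp', pvComb_false _ hp']
  | cons y ys ih =>
    rw [List.pairwise_cons] at h
    obtain ⟨hy, hys⟩ := h
    by_cases hb : pvBef p y = true
    · have hlt : pvKlen y < pvKlen p := (pv_bef_iff p y).mp hb
      rw [pv_insertBy_pos ys hb]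
      by_cases hp : pvPb t p = true
      · rw [pv_fm_pos _ hp]
        cases hc : pvFm t (y :: ys) with
        | none => rw [pvComb_none hp]
        | some m =>
          have hm : pvKlen m ≤ pvKlen y := by
            rcases List.mem_cons.mp (pv_fm_mem _ hc) with h1 | h1
            · rw [h1]
            · exact hy m h1
          rw [pvComb_up hp (by omega)]
      · have hp' : pvPb t p = false := by revert hp; cases pvPb t p <;> simp
        rw [pv_fm_neg _ hp', pvComb_false _ hp']
    · have hb' : pvBef p y = false := by revert hb; cases pvBef p y <;> simp
      have hge : pvKlen p ≤ pvKlen y := (pv_bef_false_iff p y).mp hb'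
      rw [pv_insertBy_neg ys hb']
      by_cases hpy : pvPb t y = true
      · rw [pv_fm_pos _ hpy, pv_fm_pos _ hpy]
        by_cases hp : pvPb t p = true
        · rw [pvComb_keep hp hge]
        · have hp' : pvPb t p = false := by revert hp; cases pvPb t p <;> simp
          rw [pvComb_false _ hp']
      · have hpy' : pvPb t y = false := by revert hpy; cases pvPb t y <;> simp
        rw [pv_fm_neg _ hpy', pv_fm_neg _ hpy']
        exact ih hys

-- folding insertions = folding pvComb over the original order
theorem pvB_fold (t : String) (l : List (String × Int)) :
    ∀ acc : List (String × Int), acc.Pairwise (fun a b => pvKlen b ≤ pvKlen a) →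
      pvFm t (l.foldl (fun acc x => PySem.List.insertBy pvBef x acc) acc)
        = l.foldl (pvComb t) (pvFm t acc) := by
  induction l with
  | nil => intro acc _; rfl
  | cons p l ih =>
    intro acc hacc
    simp only [List.foldl_cons]
    rw [← pv_ins_fm t p acc hacc]
    exact ih _ (pv_ins_pairwise p acc hacc)

theorem pvFindB_eq_fm (t : String) (l : List (String × Int)) :
    pvFindB t l = pvToRes (pvFm t l) := by
  induction l with
  | nil => rfl
  | cons p rest ih =>
    simp only [pvFindB, pvFm, pvPb]
    by_cases h : ((p.1 != "") && PySem.Str.isIn p.1 t) = true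
    · rw [if_pos h, if_pos h]; rfl
    · rw [if_neg h, if_neg h]; exact ih

theorem pvB_eq (text : String) (options : List String) :
    best_text_match_py_alt text options =
      pvToRes ((PySem.List.enumerate options).foldl
        (fun acc q => pvComb (PySem.Str.strip (PySem.Str.lower text)) acc (pvSwap q)) none) := by
  unfold best_text_match_py_alt
  rw [pvFindB_eq_fm, PySem.List.sorted_eq_foldl_insertBy]
  have hfold := pvB_fold (PySem.Str.strip (PySem.Str.lower text))
    ((PySem.List.enumerate options).map
      (fun p => (PySem.Str.strip (PySem.Str.lower p.2), p.1))) [] (by simp)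
  rw [show (fun (acc : List (String × Int)) (x : String × Int) =>
        PySem.List.insertBy (fun a b => decide ((fun p : String × Int => -(PySem.Str.len p.1)) a
          < (fun p : String × Int => -(PySem.Str.len p.1)) b)) x acc)
      = (fun acc x => PySem.List.insertBy pvBef x acc) from rfl]
  rw [hfold, List.foldl_map]
  rfl

-- ===== VERDICT (by name: the statement is the Claim_ definition above) =====
theorem best_text_match_py_spec : Claim_equal_best_text_match_py := by
  intro text options _
  unfold Spec_best_text_match_py
  rw [pvA_eq, pvB_eq]
  exact pvA1 (PySem.Str.strip (PySem.Str.lower text)) (PySem.List.enumerate options) 0 (-1)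
    (by omega)
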